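-- pv_equiv track=rewrite | github.com/dragoon/kilogram | mapreduce/wikipedia/spark_typed_ngrams.py | merge_titlecases
-- ===== SOURCE A (Python) =====
-- def merge_titlecases(tokens):
--     new_tokens = []
--     last_title = False
--     for token in tokens:
--         if token[0].isupper():
--             if last_title:
--                 new_tokens[-1] += ' ' + token
--             else:
--                 new_tokens.append(token)
--             last_title = True
--         else:
--             new_tokens.append(token)
--             last_title = False
--     return new_tokens
-- ===== SOURCE B (Python) =====
-- def merge_titlecases(tokens):
--     new_tokens = []
--     i = 0
--     n = len(tokens)
--     while i < n:
--         if tokens[i][0].isupper():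
--             j = i + 1
--             while j < n and tokens[j][0].isupper():
--                 j += 1
--             new_tokens.append(' '.join(tokens[i:j]))
--             i = j
--         else:
--             new_tokens.append(tokens[i])
--             i += 1
--     return new_tokens
-- ===== Notes on version B (the rewrite author's own statement) =====
-- stated objective: alternative
-- what changed: Replaced the stateful last_title flag and in-place growth of the last output token by a run-detection pass: each maximal run of uppercase-initial tokens is located with an inner scan and emitted once via ' '.join, non-title tokens are copied through.
import Mathlib
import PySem

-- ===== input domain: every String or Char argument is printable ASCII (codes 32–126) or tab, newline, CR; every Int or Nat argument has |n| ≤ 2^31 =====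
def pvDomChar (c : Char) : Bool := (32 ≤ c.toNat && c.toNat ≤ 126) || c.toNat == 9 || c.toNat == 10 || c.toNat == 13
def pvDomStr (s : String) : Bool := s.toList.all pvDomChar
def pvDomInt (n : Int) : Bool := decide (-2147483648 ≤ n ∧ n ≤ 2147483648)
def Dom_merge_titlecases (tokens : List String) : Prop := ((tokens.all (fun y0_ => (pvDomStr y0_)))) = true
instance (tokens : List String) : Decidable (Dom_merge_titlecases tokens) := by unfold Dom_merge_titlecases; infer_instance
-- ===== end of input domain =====

-- B replaces A's stateful last_title flag (which grows the last output element in place) by a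
-- run-detection pass joining each maximal uppercase-initial run at once; same cost, different decomposition.

-- token[0].isupper(); the [] case is unreachable under Pre_ (Python raises IndexError there)
def pvIsTitle (t : String) : Bool :=
  match t.toList with
  | c :: _ => PySem.Chars.isupper c
  | [] => false

-- ===== PORT A =====
-- new_tokens[-1] += ' ' + token : append to the last element of the list
def pvAppendToLast (xs : List String) (s : String) : List String :=
  match xs with
  | [] => []
  | [x] => [x ++ s]
  | x :: y :: rest => x :: pvAppendToLast (y :: rest) s

def pvStepA (st : List String × Bool) (token : String) : List String × Bool :=
  if pvIsTitle token then
    if st.2 then (pvAppendToLast st.1 (" " ++ token), true)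
    else (st.1 ++ [token], true)
  else (st.1 ++ [token], false)

def merge_titlecases (tokens : List String) : List String :=
  (tokens.foldl pvStepA ([], false)).1

-- ===== PORT B =====
def merge_titlecases_alt (tokens : List String) : List String :=
  match tokens with
  | [] => []
  | t :: rest =>
    if pvIsTitle t then
      PySem.Str.join " " (t :: rest.takeWhile pvIsTitle)
        :: merge_titlecases_alt (rest.dropWhile pvIsTitle)
    else
      t :: merge_titlecases_alt rest
termination_by tokens.length
decreasing_by
  · simpa using Nat.lt_succ_of_le (List.length_dropWhile_le pvIsTitle rest)
  · simp

-- ===== PRECONDITION & SPEC =====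
-- Pre_ excludes exactly the inputs on which Python A raises IndexError: an empty-string token.
def Pre_merge_titlecases (tokens : List String) : Prop := ∀ t ∈ tokens, t ≠ ""
instance (tokens : List String) : Decidable (Pre_merge_titlecases tokens) := by
  unfold Pre_merge_titlecases; infer_instance
def pvWitness_merge_titlecases : List String := ["New", "York", "is", "a", "Big", "City"]

def Spec_merge_titlecases (tokens : List String) (out : List String) : Prop := out = merge_titlecases_alt tokens
instance (tokens : List String) (out : List String) : Decidable (Spec_merge_titlecases tokens out) := by unfold Spec_merge_titlecases; infer_instance

-- ===== CLAIM (what is proved, stated in full; the proofs are below) =====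
def Claim_equal_merge_titlecases : Prop := ∀ (tokens : List String), Dom_merge_titlecases tokens → Pre_merge_titlecases tokens → Spec_merge_titlecases tokens (merge_titlecases tokens)

-- ===== LEMMAS AND PROOFS =====

theorem pvAppendToLast_append (acc : List String) (x s : String) :
    pvAppendToLast (acc ++ [x]) s = acc ++ [x ++ s] := by
  induction acc with
  | nil => simp [pvAppendToLast]
  | cons a acc ih =>
    cases acc with
    | nil => simp [pvAppendToLast]
    | cons b acc => simpa [pvAppendToLast] using ih

theorem pvJoin_absorb (sep x y : List Char) (rest : List (List Char)) :
    PySem.Chars.join sep ((x ++ sep ++ y) :: rest) = x ++ sep ++ PySem.Chars.join sep (y :: rest) := by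
  cases rest with
  | nil => rw [PySem.Chars.join_singleton, PySem.Chars.join_singleton]
  | cons c rest => rw [PySem.Chars.join_cons_cons, PySem.Chars.join_cons_cons]; simp

-- ' '.join(cur :: run) computed as a left fold
theorem pvJoin_foldl (cur : String) (run : List String) :
    PySem.Str.join " " (cur :: run) = run.foldl (fun s t => s ++ " " ++ t) cur := by
  induction run generalizing cur with
  | nil =>
    apply String.toList_injective
    simp [PySem.Str.toList_join, PySem.Chars.join_singleton]
  | cons b l ih =>
    rw [List.foldl_cons, ← ih (cur ++ " " ++ b)]
    apply String.toList_injective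
    rw [PySem.Str.toList_join, PySem.Str.toList_join, List.map_cons, List.map_cons,
      List.map_cons, PySem.Chars.join_cons_cons]
    have := pvJoin_absorb (' '::[]) cur.toList b.toList (List.map String.toList l)
    simp at this ⊢
    rw [this]

-- the loop invariant of A's fold, against B's run decomposition, by strong induction on length
theorem pvMain (n : Nat) :
    (∀ ts : List String, ts.length ≤ n → ∀ acc : List String,
        (ts.foldl pvStepA (acc, false)).1 = acc ++ merge_titlecases_alt ts) ∧
    (∀ ts : List String, ts.length ≤ n → ∀ (acc : List String) (cur : String),
        (ts.foldl pvStepA (acc ++ [cur], true)).1 =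
          acc ++ ((ts.takeWhile pvIsTitle).foldl (fun s t => s ++ " " ++ t) cur)
            :: merge_titlecases_alt (ts.dropWhile pvIsTitle)) := by
  induction n with
  | zero =>
    constructor
    · intro ts h acc
      obtain rfl : ts = [] := List.eq_nil_of_length_eq_zero (Nat.le_zero.mp h)
      simp [merge_titlecases_alt]
    · intro ts h acc cur
      obtain rfl : ts = [] := List.eq_nil_of_length_eq_zero (Nat.le_zero.mp h)
      simp [merge_titlecases_alt]
  | succ n ih =>
    constructor
    · intro ts h acc
      cases ts with
      | nil => simp [merge_titlecases_alt]
      | cons t rest =>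
        simp only [List.length_cons, Nat.succ_le_succ_iff] at h
        by_cases ht : pvIsTitle t = true
        · rw [List.foldl_cons]
          have hstep : pvStepA (acc, false) t = (acc ++ [t], true) := by
            simp [pvStepA, ht]
          rw [hstep, ih.2 rest h acc t, merge_titlecases_alt, if_pos ht, pvJoin_foldl]
        · rw [List.foldl_cons]
          have hstep : pvStepA (acc, false) t = (acc ++ [t], false) := by
            simp [pvStepA, ht]
          rw [hstep, ih.1 rest h (acc ++ [t]), merge_titlecases_alt, if_neg ht]
          simp
    · intro ts h acc cur
      cases ts with
      | nil => simp [merge_titlecases_alt]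
      | cons u ts' =>
        simp only [List.length_cons, Nat.succ_le_succ_iff] at h
        by_cases hu : pvIsTitle u = true
        · rw [List.foldl_cons]
          have hstep : pvStepA (acc ++ [cur], true) u = (acc ++ [cur ++ (" " ++ u)], true) := by
            simp [pvStepA, hu, pvAppendToLast_append]
          rw [hstep, ih.2 ts' h acc (cur ++ (" " ++ u))]
          rw [List.takeWhile_cons_of_pos hu, List.dropWhile_cons_of_pos hu, List.foldl_cons]
          simp [String.append_assoc]
        · rw [List.foldl_cons]
          have hstep : pvStepA (acc ++ [cur], true) u = ((acc ++ [cur]) ++ [u], false) := by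
            simp [pvStepA, hu]
          rw [hstep, ih.1 ts' h ((acc ++ [cur]) ++ [u])]
          rw [List.takeWhile_cons_of_neg (by simp [hu]), List.dropWhile_cons_of_neg (by simp [hu]),
            merge_titlecases_alt, if_neg hu]
          simp

-- ===== VERDICT (by name: the statement is the Claim_ definition above) =====
theorem merge_titlecases_spec : Claim_equal_merge_titlecases := by
  intro tokens _ _
  show merge_titlecases tokens = merge_titlecases_alt tokens
  have := (pvMain tokens.length).1 tokens le_rfl []
  simpa [merge_titlecases] using this
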